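-- pv_equiv track=rewrite | github.com/pranitashedage1/Coding-Practice | Examples/Suitable Warehouse Locations.py | count_suitable_locations
-- ===== SOURCE A (Python) =====
-- def count_suitable_locations(center, d):
--     min_center = min(center)
--     max_center = max(center)
--
--     suitable_locations = 0
--
--     # We check positions only from min_center - d // 2 to max_center + d // 2
--     for x in range(min_center - d // 2, max_center + d // 2 + 1):
--         total_distance = 0
--         for c in center:
--             total_distance += 2 * abs(x - c)
--
--         if total_distance <= d:
--             suitable_locations += 1
--
--     return suitable_locations
-- ===== SOURCE B (Python) =====
-- def count_suitable_locations(center, d):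
--     # Sort once; sweep x maintaining the total distance incrementally (O(1) per x)
--     # instead of re-summing all centers at every position.
--     cs = sorted(center)
--     n = len(cs)
--     half = d // 2
--     lo = cs[0] - half
--     hi = cs[-1] + half
--     f = 0
--     for c in cs:
--         f += 2 * abs(lo - c)
--     count = 0
--     i = 0
--     for x in range(lo, hi + 1):
--         while i < n and cs[i] <= x:
--             i += 1
--         if f <= d:
--             count += 1
--         f += 2 * (2 * i - n)
--     return count
-- ===== Notes on version B (the rewrite author's own statement) =====
-- stated objective: faster
-- what changed: Instead of re-summing the distance to every center at each candidate position, B sorts the centers once and sweeps the positions left to right, updating the total distance in O(1) per step from the count of centers already passed.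
-- outside the precondition, e.g. on count_suitable_locations([], 5): A raises ValueError, B raises IndexError
import Mathlib
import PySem

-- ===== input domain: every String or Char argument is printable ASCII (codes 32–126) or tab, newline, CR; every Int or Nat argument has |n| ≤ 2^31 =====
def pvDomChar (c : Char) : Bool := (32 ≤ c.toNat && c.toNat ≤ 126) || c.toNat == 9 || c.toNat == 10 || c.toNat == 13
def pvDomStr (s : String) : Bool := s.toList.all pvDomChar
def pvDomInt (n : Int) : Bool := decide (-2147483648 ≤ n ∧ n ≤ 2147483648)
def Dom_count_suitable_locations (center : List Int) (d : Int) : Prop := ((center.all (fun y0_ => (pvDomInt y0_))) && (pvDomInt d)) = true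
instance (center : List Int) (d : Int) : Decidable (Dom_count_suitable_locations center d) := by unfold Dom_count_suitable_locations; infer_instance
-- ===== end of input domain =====

-- B replaces A's per-position re-summing of all center distances by one sort plus an
-- incremental sweep that updates the total distance in O(1) per position (objective: faster).

-- ===== PORT A =====
def count_suitable_locations (center : List Int) (d : Int) : Int :=
  match PySem.List.min? center (fun x => x), PySem.List.max? center (fun x => x) with
  | some mn, some mx =>
      (PySem.List.pyRange (mn - PySem.Int.floordiv d 2) (mx + PySem.Int.floordiv d 2 + 1) 1).foldl
        (fun acc x =>
          let total := center.foldl (fun t c => t + 2 * |x - c|) 0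
          if total ≤ d then acc + 1 else acc) 0
  | _, _ => 0

-- ===== PORT B =====
-- Source B's index i into the sorted list cs is ported as the suffix rest = cs[i:]
-- (so i = cs.length - rest.length); the inner while advancing i is csl_dropLE. Exact.
def csl_dropLE (x : Int) : List Int → List Int
  | [] => []
  | c :: cs => if c ≤ x then csl_dropLE x cs else c :: cs

def csl_sweep (d n : Int) : List Int → List Int → Int → Int → Int
  | [], _, _, count => count
  | x :: xs, rest, f, count =>
      let rest' := csl_dropLE x rest
      csl_sweep d n xs rest'
        (f + 2 * (2 * (n - (rest'.length : Int)) - n))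
        (if f ≤ d then count + 1 else count)

def count_suitable_locations_alt (center : List Int) (d : Int) : Int :=
  match PySem.List.sorted center (fun x => x) false with
  | [] => 0
  | c0 :: t =>
      let n : Int := (c0 :: t).length
      let half := PySem.Int.floordiv d 2
      let lo := c0 - half
      let hi := PySem.List.pyGetD (c0 :: t) (-1) 0 + half   -- cs[-1]; in range: list nonempty
      let f0 := (c0 :: t).foldl (fun acc c => acc + 2 * |lo - c|) 0
      csl_sweep d n (PySem.List.pyRange lo (hi + 1) 1) (c0 :: t) f0 0

-- ===== PRECONDITION & SPEC =====
-- A raises ValueError (min of an empty sequence) on center = []; B raises IndexError there.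
def Pre_count_suitable_locations (center : List Int) (d : Int) : Prop := center ≠ []
instance (center : List Int) (d : Int) : Decidable (Pre_count_suitable_locations center d) := by
  unfold Pre_count_suitable_locations; infer_instance

def pvWitness_count_suitable_locations : List Int × Int := ([1, 5, 2], 10)

def Spec_count_suitable_locations (center : List Int) (d : Int) (out : Int) : Prop := out = count_suitable_locations_alt center d
instance (center : List Int) (d : Int) (out : Int) : Decidable (Spec_count_suitable_locations center d out) := by unfold Spec_count_suitable_locations; infer_instance

-- ===== CLAIM (what is proved, stated in full; the proofs are below) =====
def Claim_equal_count_suitable_locations : Prop := ∀ (center : List Int) (d : Int), Dom_count_suitable_locations center d → Pre_count_suitable_locations center d → Spec_count_suitable_locations center d (count_suitable_locations center d)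

-- ===== LEMMAS AND PROOFS =====

-- the total distance A computes at position x: 2 * Σ_{c ∈ cs} |x - c|
def cslS (cs : List Int) (x : Int) : Int := 2 * ((cs.map (fun c => |x - c|)).sum)

theorem csl_fold_S (cs : List Int) (x a : Int) :
    cs.foldl (fun t c => t + 2 * |x - c|) a = a + cslS cs x := by
  induction cs generalizing a with
  | nil => simp [cslS]
  | cons c cs ih =>
      simp only [List.foldl_cons]
      rw [ih]
      simp only [cslS, List.map_cons, List.sum_cons]
      ring

theorem csl_S_perm {cs ds : List Int} (h : cs.Perm ds) (x : Int) : cslS cs x = cslS ds x := by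
  unfold cslS
  rw [List.Perm.sum_eq (List.Perm.map _ h)]

theorem csl_S_step (cs : List Int) (x : Int) :
    cslS cs (x + 1) =
      cslS cs x + 2 * (2 * ((cs.countP (fun c => decide (c ≤ x)) : Int)) - (cs.length : Int)) := by
  induction cs with
  | nil => simp [cslS]
  | cons c cs ih =>
      simp only [cslS, List.map_cons, List.sum_cons, List.countP_cons, List.length_cons] at *
      by_cases hc : c ≤ x
      · have habs : |x + 1 - c| = |x - c| + 1 := by
          rw [abs_of_nonneg (by omega), abs_of_nonneg (by omega)]; ring
        simp only [hc, decide_true, if_pos]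
        push_cast
        rw [habs]; linarith [ih]
      · have habs : |x + 1 - c| = |x - c| - 1 := by
          rw [abs_of_nonpos (by omega), abs_of_nonpos (by omega)]; ring
        simp only [hc, decide_false]
        push_cast
        rw [habs]; linarith [ih]

theorem csl_dropLE_spec (x : Int) (rest : List Int) (hs : rest.Pairwise (· ≤ ·)) :
    ∃ q, rest = q ++ csl_dropLE x rest ∧ (∀ c ∈ q, c ≤ x) ∧ (∀ c ∈ csl_dropLE x rest, x < c) := by
  induction rest with
  | nil => exact ⟨[], by simp [csl_dropLE]⟩
  | cons c cs ih =>
      rcases List.pairwise_cons.mp hs with ⟨hc, hcs⟩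
      by_cases h : c ≤ x
      · rcases ih hcs with ⟨q, hq, hql, hqr⟩
        refine ⟨c :: q, ?_, ?_, ?_⟩
        · simp only [csl_dropLE, if_pos h, List.cons_append]
          exact congrArg (c :: ·) hq
        · intro y hy
          rcases List.mem_cons.mp hy with rfl | hy
          · exact h
          · exact hql y hy
        · simpa [csl_dropLE, h] using hqr
      · refine ⟨[], by simp [csl_dropLE, h], by simp, ?_⟩
        intro y hy
        simp only [csl_dropLE, if_neg h] at hy
        rcases List.mem_cons.mp hy with rfl | hy
        · omega
        · have := hc y hy; omega

theorem csl_countP_split (cs pre rest : List Int) (x : Int)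
    (hcs : cs = pre ++ rest) (hpre : ∀ c ∈ pre, c ≤ x) (hrest : ∀ c ∈ rest, x < c) :
    cs.countP (fun c => decide (c ≤ x)) = pre.length := by
  subst hcs
  rw [List.countP_append]
  have h1 : pre.countP (fun c => decide (c ≤ x)) = pre.length :=
    List.countP_eq_length.mpr (fun c hc => by simpa using hpre c hc)
  have h2 : rest.countP (fun c => decide (c ≤ x)) = 0 :=
    List.countP_eq_zero.mpr (fun c hc => by simpa using (by have := hrest c hc; omega : ¬ c ≤ x))
  omega

-- loop invariant of B's sweep: entering the iteration for position a with the remaining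
-- suffix `rest` (all dropped elements < a) and f = cslS cs a, the sweep counts exactly
-- the positions x of the range with cslS cs x ≤ d.
theorem csl_sweep_eq (d : Int) (cs : List Int) (hs : cs.Pairwise (· ≤ ·)) :
    ∀ (k : Nat) (a b : Int), (b - a).toNat = k →
      ∀ (pre rest : List Int) (count : Int), cs = pre ++ rest → (∀ c ∈ pre, c < a) →
        csl_sweep d (cs.length : Int) (PySem.List.pyRange a b 1) rest (cslS cs a) count
          = (PySem.List.pyRange a b 1).foldl
              (fun acc x => if cslS cs x ≤ d then acc + 1 else acc) count := by
  intro k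
  induction k with
  | zero =>
      intro a b hk pre rest count hsplit hpre
      have : PySem.List.pyRange a b 1 = [] := by
        rw [PySem.List.pyRange_one]
        simp
        omega
      simp [this, csl_sweep]
  | succ k ih =>
      intro a b hk pre rest count hsplit hpre
      have hab : a < b := by omega
      rw [PySem.List.pyRange_one_cons hab]
      have hrest_pw : rest.Pairwise (· ≤ ·) := by
        subst hsplit; exact (List.pairwise_append.mp hs).2.1
      rcases csl_dropLE_spec a rest hrest_pw with ⟨q, hq, hql, hqr⟩
      have hsplit' : cs = (pre ++ q) ++ csl_dropLE a rest := by
        rw [List.append_assoc, ← hq]; exact hsplit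
      have hpre' : ∀ c ∈ pre ++ q, c ≤ a := by
        intro c hc
        rcases List.mem_append.mp hc with hc | hc
        · have := hpre c hc; omega
        · exact hql c hc
      have hcount := csl_countP_split cs (pre ++ q) (csl_dropLE a rest) a hsplit' hpre' hqr
      have hlentot : cs.length = (pre ++ q).length + (csl_dropLE a rest).length := by
        rw [hsplit', List.length_append]
      have hlen : ((cs.length : Int) - ((csl_dropLE a rest).length : Int))
          = ((cs.countP (fun c => decide (c ≤ a)) : Int)) := by
        rw [hcount]; omega
      simp only [csl_sweep, List.foldl_cons]
      rw [hlen, ← csl_S_step cs a]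
      exact ih (a + 1) b (by omega) (pre ++ q) (csl_dropLE a rest)
        (if cslS cs a ≤ d then count + 1 else count) hsplit'
        (fun c hc => by have := hpre' c hc; omega)

-- every element of a ≤-sorted nonempty list is ≤ its last element
theorem csl_le_getLast (l : List Int) (hpw : l.Pairwise (· ≤ ·)) (hne : l ≠ []) :
    ∀ y ∈ l, y ≤ l.getLast hne := by
  induction l with
  | nil => simp
  | cons c t ih =>
      intro y hy
      cases t with
      | nil =>
          simp only [List.mem_singleton] at hy
          subst hy; simp
      | cons c1 t1 =>
          rw [List.getLast_cons (by simp)]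
          rcases List.mem_cons.mp hy with rfl | hy
          · exact (List.pairwise_cons.mp hpw).1 _ (List.getLast_mem _)
          · exact ih (List.pairwise_cons.mp hpw).2 (by simp) y hy

-- head of the sorted list is min(center), its [-1] element is max(center)
theorem csl_sorted_head_last (center : List Int) (c0 : Int) (t : List Int)
    (h : PySem.List.sorted center (fun x => x) false = c0 :: t)
    (mn mx : Int) (hmn : PySem.List.min? center (fun x => x) = some mn)
    (hmx : PySem.List.max? center (fun x => x) = some mx) :
    c0 = mn ∧ PySem.List.pyGetD (c0 :: t) (-1) 0 = mx := by
  have hperm : (c0 :: t).Perm center := h ▸ PySem.List.sorted_perm center (fun x => x) false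
  have hpw : (c0 :: t).Pairwise (· ≤ ·) := by
    have := PySem.List.sorted_pairwise center (fun x => x)
    rw [h] at this; exact this
  have hmem : ∀ y ∈ (c0 :: t), y ∈ center := fun y hy => hperm.mem_iff.mp hy
  constructor
  · have h1 : mn ≤ c0 := PySem.List.min?_isMin hmn c0 (hmem c0 (by simp))
    have h2 : c0 ≤ mn := by
      have hmnc : mn ∈ center := PySem.List.min?_mem hmn
      have : mn ∈ c0 :: t := hperm.mem_iff.mpr hmnc
      rcases List.mem_cons.mp this with rfl | hmt
      · exact le_refl _
      · exact (List.pairwise_cons.mp hpw).1 mn hmt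
    omega
  · have hne : (c0 :: t) ≠ [] := by simp
    have e : PySem.List.pyGetD (c0 :: t) (-1) 0 = (c0 :: t).getLast hne :=
      PySem.List.pyGetD_neg_one (c0 :: t) 0 hne
    have h1 : (c0 :: t).getLast hne ≤ mx :=
      PySem.List.max?_isMax hmx _ (hmem _ (List.getLast_mem _))
    have h2 : mx ≤ (c0 :: t).getLast hne := by
      have hmxc : mx ∈ center := PySem.List.max?_mem hmx
      exact csl_le_getLast _ hpw hne mx (hperm.mem_iff.mpr hmxc)
    omega

-- ===== VERDICT (by name: the statement is the Claim_ definition above) =====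
theorem count_suitable_locations_spec : Claim_equal_count_suitable_locations := by
  intro center d _ hpre
  unfold Spec_count_suitable_locations
  obtain ⟨mn, hmn⟩ : ∃ mn, PySem.List.min? center (fun x => x) = some mn := by
    cases hm : PySem.List.min? center (fun x => x) with
    | none => exact absurd ((PySem.List.min?_eq_none_iff _ _).mp hm) hpre
    | some m => exact ⟨m, rfl⟩
  obtain ⟨mx, hmx⟩ : ∃ mx, PySem.List.max? center (fun x => x) = some mx := by
    cases hm : PySem.List.max? center (fun x => x) with
    | none => exact absurd ((PySem.List.max?_eq_none_iff _ _).mp hm) hpre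
    | some m => exact ⟨m, rfl⟩
  cases hsorted : PySem.List.sorted center (fun x => x) false with
  | nil => exact absurd ((PySem.List.sorted_eq_nil_iff _ _ _).mp hsorted) hpre
  | cons c0 t =>
      obtain ⟨hc0, hlast⟩ := csl_sorted_head_last center c0 t hsorted mn mx hmn hmx
      subst hc0
      subst hlast
      have hperm : (c0 :: t).Perm center :=
        hsorted ▸ PySem.List.sorted_perm center (fun x => x) false
      have hpw : (c0 :: t).Pairwise (· ≤ ·) := by
        have := PySem.List.sorted_pairwise center (fun x => x)
        rw [hsorted] at this; exact this
      unfold count_suitable_locations count_suitable_locations_alt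
      rw [hmn, hmx, hsorted]
      dsimp only
      have hfold : ∀ x : Int,
          center.foldl (fun t c => t + 2 * |x - c|) 0 = cslS (c0 :: t) x := by
        intro x
        rw [csl_fold_S, zero_add, ← csl_S_perm hperm x]
      rw [csl_fold_S, zero_add]
      rw [csl_sweep_eq d (c0 :: t) hpw
        ((PySem.List.pyGetD (c0 :: t) (-1) 0 + PySem.Int.floordiv d 2 + 1)
          - (c0 - PySem.Int.floordiv d 2)).toNat
        (c0 - PySem.Int.floordiv d 2)
        (PySem.List.pyGetD (c0 :: t) (-1) 0 + PySem.Int.floordiv d 2 + 1)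
        rfl [] (c0 :: t) 0 rfl (by simp)]
      simp only [hfold]
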